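-- pv_equiv track=rewrite | github.com/richardvozar/teaching_2022_01 | 11/megoldas_11.py | kasszahoz_rendel_01
-- ===== SOURCE A (Python) =====
-- def kasszahoz_rendel_01(s):
-- 	s = s.split(';')
-- 	ret = [[], []]
-- 	for n in s:
-- 		if int(n)%2:
-- 			ret[1].append(int(n))
-- 		else:
-- 			ret[0].append(int(n))
-- 	ret[0].sort()
-- 	ret[1].sort()
-- 	return ret
-- ===== SOURCE B (Python) =====
-- def kasszahoz_rendel_01(s):
-- 	nums = sorted(int(n) for n in s.split(';'))
-- 	return [[x for x in nums if x % 2 == 0], [x for x in nums if x % 2]]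
-- ===== Notes on version B (the rewrite author's own statement) =====
-- stated objective: simpler
-- what changed: Instead of appending into two bucket lists inside a loop and sorting each bucket, B parses all tokens, sorts the whole list once, then filters the sorted list by parity.
import Mathlib
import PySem

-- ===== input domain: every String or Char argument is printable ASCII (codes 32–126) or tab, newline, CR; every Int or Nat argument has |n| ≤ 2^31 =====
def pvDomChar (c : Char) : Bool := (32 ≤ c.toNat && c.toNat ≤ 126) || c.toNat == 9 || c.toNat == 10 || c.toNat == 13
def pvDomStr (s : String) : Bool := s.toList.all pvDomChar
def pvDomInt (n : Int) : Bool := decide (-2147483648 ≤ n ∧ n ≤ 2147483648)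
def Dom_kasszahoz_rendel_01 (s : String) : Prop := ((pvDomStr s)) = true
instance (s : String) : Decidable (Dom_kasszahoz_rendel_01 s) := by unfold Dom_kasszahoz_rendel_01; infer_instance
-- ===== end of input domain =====

-- B partition-then-sort is replaced by parse-all, one global sort, then filter by parity; return value only.

-- ===== PORT A =====
-- A's loop over the tokens: int(n) may raise ValueError (none); append to odds if int(n)%2 else evens.
def kRLoopA : List String → List Int → List Int → Option (List Int × List Int)
  | [], evens, odds => some (evens, odds)
  | t :: ts, evens, odds =>
    match PySem.Int.ofStr? t with
    | none => none
    | some v =>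
      if PySem.Int.mod v 2 ≠ 0 then kRLoopA ts evens (odds ++ [v])
      else kRLoopA ts (evens ++ [v]) odds

def kasszahoz_rendel_01 (s : String) : List (List Int) :=
  match kRLoopA ((PySem.Str.split? s ";").getD []) [] [] with
  | none => []   -- int(n) raised ValueError; excluded by Pre_
  | some (evens, odds) =>
      [PySem.List.sorted evens (fun x => x) false, PySem.List.sorted odds (fun x => x) false]

-- ===== PORT B =====
-- [int(n) for n in parts], ValueError = none
def kRParseAll : List String → Option (List Int)
  | [] => some []
  | t :: ts =>
    match PySem.Int.ofStr? t, kRParseAll ts with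
    | some v, some vs => some (v :: vs)
    | _, _ => none

def kasszahoz_rendel_01_alt (s : String) : List (List Int) :=
  match kRParseAll ((PySem.Str.split? s ";").getD []) with
  | none => []   -- int(n) raised ValueError; excluded by Pre_
  | some vs =>
      let nums := PySem.List.sorted vs (fun x => x) false
      [nums.filter (fun x => PySem.Int.mod x 2 = 0),
       nums.filter (fun x => PySem.Int.mod x 2 ≠ 0)]

-- ===== PRECONDITION & SPEC =====
-- Pre_ excludes exactly the inputs where some token is not a valid int literal, on which A raises ValueError.
def Pre_kasszahoz_rendel_01 (s : String) : Prop :=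
  ∀ t ∈ (PySem.Str.split? s ";").getD [], (PySem.Int.ofStr? t).isSome = true
instance (s : String) : Decidable (Pre_kasszahoz_rendel_01 s) := by unfold Pre_kasszahoz_rendel_01; infer_instance
def pvWitness_kasszahoz_rendel_01 : String := "4;-3;10;7;2"

def Spec_kasszahoz_rendel_01 (s : String) (out : List (List Int)) : Prop := out = kasszahoz_rendel_01_alt s
instance (s : String) (out : List (List Int)) : Decidable (Spec_kasszahoz_rendel_01 s out) := by unfold Spec_kasszahoz_rendel_01; infer_instance

-- ===== CLAIM (what is proved, stated in full; the proofs are below) =====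
def Claim_equal_kasszahoz_rendel_01 : Prop := ∀ (s : String), Dom_kasszahoz_rendel_01 s → Pre_kasszahoz_rendel_01 s → Spec_kasszahoz_rendel_01 s (kasszahoz_rendel_01 s)

-- ===== LEMMAS AND PROOFS =====

-- B's parser succeeds when every token parses, and names the parsed values.
theorem kRParseAll_isSome (ts : List String)
    (h : ∀ t ∈ ts, (PySem.Int.ofStr? t).isSome = true) :
    ∃ vs, kRParseAll ts = some vs := by
  induction ts with
  | nil => exact ⟨[], rfl⟩
  | cons t ts ih =>
    obtain ⟨vs, hvs⟩ := ih (fun u hu => h u (List.mem_cons_of_mem _ hu))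
    obtain ⟨v, hv⟩ := Option.isSome_iff_exists.mp (h t (List.mem_cons_self ..))
    exact ⟨v :: vs, by simp [kRParseAll, hv, hvs]⟩

-- A's loop, when every token parses, appends exactly the even / odd parsed values.
theorem kRLoopA_eq (ts : List String) (vs evens odds : List Int)
    (h : kRParseAll ts = some vs) :
    kRLoopA ts evens odds =
      some (evens ++ vs.filter (fun x => PySem.Int.mod x 2 = 0),
            odds ++ vs.filter (fun x => PySem.Int.mod x 2 ≠ 0)) := by
  induction ts generalizing vs evens odds with
  | nil =>
    simp [kRParseAll] at h
    subst h; simp [kRLoopA]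
  | cons t ts ih =>
    unfold kRParseAll at h
    cases hv : PySem.Int.ofStr? t with
    | none => rw [hv] at h; simp at h
    | some v =>
      rw [hv] at h
      cases hvs : kRParseAll ts with
      | none => rw [hvs] at h; simp at h
      | some ws =>
        rw [hvs] at h; simp at h
        subst h
        rcases Int.emod_two_eq v with h2 | h2 <;>
          simp [kRLoopA, hv, h2, ih ws _ _ hvs, List.filter_cons]

-- sorting then filtering = filtering then sorting (Int, identity key).
theorem sorted_filter_comm (vs : List Int) (p : Int → Bool) :
    PySem.List.sorted (vs.filter p) (fun x => x) false =
      (PySem.List.sorted vs (fun x => x) false).filter p := by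
  apply PySem.List.sorted_id_eq_of_perm_of_pairwise
  · exact (PySem.List.sorted_perm vs (fun x => x) false).filter p
  · exact List.Pairwise.filter p (PySem.List.sorted_pairwise vs (fun x => x))

-- ===== VERDICT (by name: the statement is the Claim_ definition above) =====
theorem kasszahoz_rendel_01_spec : Claim_equal_kasszahoz_rendel_01 := by
  intro s _ hpre
  unfold Pre_kasszahoz_rendel_01 at hpre
  obtain ⟨vs, hvs⟩ := kRParseAll_isSome _ hpre
  unfold Spec_kasszahoz_rendel_01 kasszahoz_rendel_01 kasszahoz_rendel_01_alt
  rw [hvs, kRLoopA_eq _ vs [] [] hvs]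
  simp [sorted_filter_comm]
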